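-- pv_equiv track=rewrite | github.com/tsuru7/algorithm-study | AtCoder/CODEFORMULA2014Final/C.py | get_username
-- ===== SOURCE A (Python) =====
-- def get_username(s):
--     i = 0
--     name = ''
--     username = False
--     while i < len(s):
--         if username and s[i] != '@' and s[i] != ' ':
--             name += s[i]
--         elif username and (s[i] == '@' or s[i] == ' '):
--             return name, s[i:]
--         elif s[i] == '@':
--             username = True
--         i += 1
--     return name, ''
-- ===== SOURCE B (Python) =====
-- def get_username(s):
--     # Split off everything after the first '@'; no '@' means no username at all.
--     _, sep, rest = s.partition('@')
--     if not sep: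
--         return '', ''
--     # The name ends at the earliest '@' or ' ' in rest (or at the end of rest).
--     pa = rest.find('@')
--     ps = rest.find(' ')
--     cut = len(rest)
--     if pa != -1 and pa < cut:
--         cut = pa
--     if ps != -1 and ps < cut:
--         cut = ps
--     return rest[:cut], rest[cut:]
-- ===== Notes on version B (the rewrite author's own statement) =====
-- stated objective: faster
-- what changed: Replaces the flag-driven per-character loop with s.partition('@') plus two str.find calls that locate the earliest delimiter, then two slices; no boolean state and no per-character string accumulation.
import Mathlib
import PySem

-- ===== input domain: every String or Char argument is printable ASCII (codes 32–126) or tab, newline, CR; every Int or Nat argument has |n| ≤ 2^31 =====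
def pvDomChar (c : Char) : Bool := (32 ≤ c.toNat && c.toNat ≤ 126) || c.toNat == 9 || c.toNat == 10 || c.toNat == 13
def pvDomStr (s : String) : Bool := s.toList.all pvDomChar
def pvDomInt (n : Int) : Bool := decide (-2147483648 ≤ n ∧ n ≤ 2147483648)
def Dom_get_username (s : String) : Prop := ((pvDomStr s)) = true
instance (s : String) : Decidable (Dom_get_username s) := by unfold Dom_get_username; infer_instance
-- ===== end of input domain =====

-- B replaces A's flag-driven character loop with partition('@') + two find calls and two slices (same O(n), measurably faster by constant factor: C-level scans instead of a Python char loop).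

-- ===== PORT A =====
-- the while loop over indices i, with state (name, username); strings modelled as List Char
def getUserLoop : List Char → List Char → Bool → List Char × List Char
  | [], name, _ => (name, [])
  | c :: rest, name, username =>
    if username && !(c == '@') && !(c == ' ') then getUserLoop rest (name ++ [c]) username
    else if username && ((c == '@') || (c == ' ')) then (name, c :: rest)
    else if c == '@' then getUserLoop rest name true
    else getUserLoop rest name username

def get_username (s : String) : String × String :=
  let r := getUserLoop s.toList [] false
  (String.ofList r.1, String.ofList r.2)

-- ===== PORT B =====
-- hand port of s.partition('@') specialised to the used part: the piece after the first '@' (none if no '@'); exact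
def restAfterAt : List Char → Option (List Char)
  | [] => none
  | c :: t => if c = '@' then some t else restAfterAt t

-- hand port of str.find for a single-character needle: first index or -1; exact on single chars
def findCh (ch : Char) : List Char → Int
  | [] => -1
  | c :: t => if c = ch then 0 else (let r := findCh ch t; if r = -1 then -1 else r + 1)

def get_username_alt (s : String) : String × String :=
  match restAfterAt s.toList with
  | none => ("", "")
  | some rest =>
    let pa := findCh '@' rest
    let ps := findCh ' ' rest
    let cut0 : Int := rest.length
    let cut1 : Int := if pa ≠ -1 ∧ pa < cut0 then pa else cut0
    let cut2 : Int := if ps ≠ -1 ∧ ps < cut1 then ps else cut1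
    (String.ofList (rest.take cut2.toNat), String.ofList (rest.drop cut2.toNat))

-- ===== PRECONDITION & SPEC =====
def Spec_get_username (s : String) (out : String × String) : Prop := out = get_username_alt s
instance (s : String) (out : String × String) : Decidable (Spec_get_username s out) := by unfold Spec_get_username; infer_instance

-- ===== CLAIM (what is proved, stated in full; the proofs are below) =====
def Claim_equal_get_username : Prop := ∀ (s : String), Dom_get_username s → Spec_get_username s (get_username s)

-- ===== LEMMAS AND PROOFS =====

-- the "keep" predicate: characters that belong to the name
def keepCh (c : Char) : Bool := !(c == '@') && !(c == ' ')

theorem findCh_bounds (ch : Char) (l : List Char) :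
    findCh ch l = -1 ∨ (0 ≤ findCh ch l ∧ findCh ch l < l.length) := by
  induction l with
  | nil => left; rfl
  | cons c t ih =>
    simp only [findCh, List.length_cons]
    rcases ih with h1 | h1 <;> split_ifs <;> omega

-- phase 1: before any '@', the loop just scans for the first '@'
theorem getUserLoop_false (l : List Char) (name : List Char) :
    getUserLoop l name false =
      match restAfterAt l with
      | none => (name, [])
      | some t => getUserLoop t name true := by
  induction l with
  | nil => rfl
  | cons c t ih =>
    simp only [getUserLoop, restAfterAt, Bool.false_and]
    by_cases h : c = '@'
    · simp [h]
    · simp [h, ih]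

-- phase 2: after the '@', the loop takes the longest keepCh prefix
theorem getUserLoop_true (l : List Char) (name : List Char) :
    getUserLoop l name true = (name ++ l.takeWhile keepCh, l.dropWhile keepCh) := by
  induction l generalizing name with
  | nil => simp [getUserLoop]
  | cons c t ih =>
    simp only [getUserLoop, Bool.true_and]
    by_cases hk : keepCh c = true
    · have h1 : (!(c == '@') && !(c == ' ')) = true := hk
      simp [h1, ih, hk]
    · have h2 : ((c == '@') || (c == ' ')) = true := by
        unfold keepCh at hk
        cases h3 : c == '@' <;> cases h4 : c == ' ' <;> simp_all
      have h1 : (!(c == '@') && !(c == ' ')) = false := by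
        cases h3 : c == '@' <;> cases h4 : c == ' ' <;> simp_all
      simp [h1, h2, hk]

-- the take/drop at the keepCh-prefix length recover takeWhile/dropWhile
theorem take_takeWhile_len (p : Char → Bool) (l : List Char) :
    l.take (l.takeWhile p).length = l.takeWhile p ∧ l.drop (l.takeWhile p).length = l.dropWhile p := by
  induction l with
  | nil => simp
  | cons c t ih =>
    by_cases h : p c
    · simp [h, ih]
    · simp [h]

-- the cut computed from the two finds is precisely the keepCh-prefix length
theorem cut_eq_takeWhile (rest : List Char) :
    (let pa := findCh '@' rest
     let ps := findCh ' ' rest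
     let cut0 : Int := rest.length
     let cut1 : Int := if pa ≠ -1 ∧ pa < cut0 then pa else cut0
     let cut2 : Int := if ps ≠ -1 ∧ ps < cut1 then ps else cut1
     cut2) = (rest.takeWhile keepCh).length := by
  induction rest with
  | nil => simp [findCh]
  | cons c t ih =>
    simp only at ih
    have hb1 := findCh_bounds '@' t
    have hb2 := findCh_bounds ' ' t
    by_cases ha : c = '@' <;> by_cases hs : c = ' '
    · subst ha; exact absurd hs (by decide)
    · have hk : keepCh c = false := by simp [keepCh, ha]
      simp only [findCh, if_pos ha, if_neg hs, List.takeWhile_cons, hk,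
        Bool.false_eq_true, if_false, List.length_cons, List.length_nil]
      rcases hb2 with h2 | h2 <;> split_ifs <;> omega
    · have hk : keepCh c = false := by simp [keepCh, hs]
      simp only [findCh, if_neg ha, if_pos hs, List.takeWhile_cons, hk,
        Bool.false_eq_true, if_false, List.length_cons, List.length_nil]
      rcases hb1 with h1 | h1 <;> split_ifs <;> omega
    · have hk : keepCh c = true := by simp [keepCh, ha, hs]
      simp only [findCh, if_neg ha, if_neg hs, List.takeWhile_cons, hk,
        if_true, List.length_cons]
      rcases hb1 with h1 | h1 <;> rcases hb2 with h2 | h2 <;>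
        split_ifs at ih ⊢ <;> omega

-- ===== VERDICT (by name: the statement is the Claim_ definition above) =====
theorem get_username_spec : Claim_equal_get_username := by
  intro s _
  unfold Spec_get_username get_username get_username_alt
  rw [getUserLoop_false]
  cases h : restAfterAt s.toList with
  | none => simp
  | some rest =>
    simp only [getUserLoop_true, List.nil_append]
    have hc := cut_eq_takeWhile rest
    simp only at hc
    rw [hc]
    have ht := take_takeWhile_len keepCh rest
    simp only [Int.toNat_natCast, ht.1, ht.2]
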